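-- pv_equiv track=rewrite | github.com/tanishqyadav/PythonCollections2022 | find_duplicate_number.py | findDuplicate
-- ===== SOURCE A (Python) =====
-- from typing import List
--
-- def findDuplicate(nums: List[int]) -> int:
--     l={}
--     for i in nums:
--
--         if i not in l:
--             l[i]=1
--         else:
--             l[i]+=1
--
--     for i,j in l.items():
--         if j>1:
--             return i
-- ===== SOURCE B (Python) =====
-- from typing import List
--
-- def findDuplicate(nums: List[int]) -> int:
--     for i in nums:
--         if nums.count(i) > 1:
--             return i
-- ===== Notes on version B (the rewrite author's own statement) =====
-- stated objective: simpler
-- what changed: Drops the frequency dictionary and its second items() pass: B scans nums in order and returns the first element whose nums.count exceeds 1 (same earliest-first-occurrence answer), falling through to None otherwise.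
import Mathlib
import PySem

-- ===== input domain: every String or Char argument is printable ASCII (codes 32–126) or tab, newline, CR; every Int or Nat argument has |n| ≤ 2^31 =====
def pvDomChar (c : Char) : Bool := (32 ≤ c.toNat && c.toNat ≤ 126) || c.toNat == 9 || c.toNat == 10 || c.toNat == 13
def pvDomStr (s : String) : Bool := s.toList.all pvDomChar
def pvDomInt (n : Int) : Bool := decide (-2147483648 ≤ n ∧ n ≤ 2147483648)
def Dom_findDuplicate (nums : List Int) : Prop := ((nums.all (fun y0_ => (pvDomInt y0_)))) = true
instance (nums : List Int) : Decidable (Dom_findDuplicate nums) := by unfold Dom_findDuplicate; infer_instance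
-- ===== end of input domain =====

-- B drops A's frequency dictionary and its second items() pass: it scans nums in order and
-- returns the first element whose count in nums exceeds 1 (same value, None when no duplicate).

-- ===== PORT A =====
-- second loop of A: first key whose stored count exceeds 1, else fall through (None)
def findDupScanA : List (Int × Int) → Option Int
  | [] => none
  | (i, j) :: rest => if j > 1 then some i else findDupScanA rest

def findDuplicate (nums : List Int) : Option Int :=
  let l := nums.foldl
    (fun d i => if d.contains i = false then d.insert i 1 else d.insert i (d.getD i 0 + 1))
    PySem.Dict.empty
  findDupScanA l.items

-- ===== PORT B =====
def findDupGoB (nums : List Int) : List Int → Option Int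
  | [] => none
  | x :: rest => if PySem.List.count nums x > 1 then some x else findDupGoB nums rest

def findDuplicate_alt (nums : List Int) : Option Int := findDupGoB nums nums

-- ===== PRECONDITION & SPEC =====
def Spec_findDuplicate (nums : List Int) (out : Option Int) : Prop := out = findDuplicate_alt nums
instance (nums : List Int) (out : Option Int) : Decidable (Spec_findDuplicate nums out) := by unfold Spec_findDuplicate; infer_instance

-- ===== CLAIM (what is proved, stated in full; the proofs are below) =====
def Claim_equal_findDuplicate : Prop := ∀ (nums : List Int), Dom_findDuplicate nums → Spec_findDuplicate nums (findDuplicate nums)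

-- ===== LEMMAS AND PROOFS =====

-- A's build loop's step function is the standard counter step
theorem findDup_step_eq :
    (fun (d : PySem.Dict Int Int) (i : Int) =>
        if d.contains i = false then d.insert i 1 else d.insert i (d.getD i 0 + 1))
      = fun d i => d.insert i (d.getD i 0 + 1) := by
  funext d i
  by_cases h : d.contains i = false
  · simp [h, PySem.Dict.getD_of_not_contains d 0 h]
  · simp [h]

-- A's second loop over (key, count) pairs is a find? over the keys
theorem findDupScanA_map (c : Int → Int) (l : List Int) :
    findDupScanA (l.map fun k => (k, c k)) = l.find? (fun k => decide (1 < c k)) := by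
  induction l with
  | nil => rfl
  | cons k rest ih =>
      by_cases h : 1 < c k
      · simp [findDupScanA, List.find?_cons_of_pos, h]
      · rw [List.map_cons]
        simp only [findDupScanA, if_neg h, ih]
        rw [List.find?_cons_of_neg (by simp [h])]

-- B's loop is a find? over nums itself
theorem findDupGoB_eq (nums l : List Int) :
    findDupGoB nums l = l.find? (fun x => decide (1 < PySem.List.count nums x)) := by
  induction l with
  | nil => rfl
  | cons x rest ih =>
      by_cases h : 1 < PySem.List.count nums x
      · rw [List.find?_cons_of_pos (by simpa [PySem.List.count] using h)]
        have h' : 1 < List.count x nums := by simpa [PySem.List.count] using h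
        simp [findDupGoB, h']
      · simp only [findDupGoB, if_neg h, ih]
        rw [List.find?_cons_of_neg (by simpa [PySem.List.count] using h)]

-- first match over a Set.add-fold: earlier matches come from acc, new ones keep xs's order
theorem find?_foldl_add (p : Int → Bool) (xs : List Int) :
    ∀ acc : List Int, (xs.foldl PySem.Set.add acc).find? p = (acc.find? p).or (xs.find? p) := by
  induction xs with
  | nil => intro acc; simp
  | cons x rest ih =>
      intro acc
      rw [List.foldl_cons, ih]
      by_cases hmem : x ∈ acc
      · have hadd : PySem.Set.add acc x = acc := by simp [PySem.Set.add, hmem]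
        rw [hadd]
        by_cases hp : p x = true
        · rcases Option.isSome_iff_exists.mp (List.find?_isSome.mpr ⟨x, hmem, hp⟩) with ⟨b, hb⟩
          rw [List.find?_cons_of_pos hp]
          simp [hb]
        · rw [List.find?_cons_of_neg (by simpa using hp)]
      · have hadd : PySem.Set.add acc x = acc ++ [x] := by simp [PySem.Set.add, hmem]
        rw [hadd, List.find?_append, Option.or_assoc,
            show x :: rest = [x] ++ rest from rfl, List.find?_append]

theorem find?_ofList (p : Int → Bool) (xs : List Int) :
    (PySem.Set.ofList xs).find? p = xs.find? p := by
  have := find?_foldl_add p xs []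
  simpa [PySem.Set.ofList, PySem.Set.empty] using this

-- ===== VERDICT (by name: the statement is the Claim_ definition above) =====
theorem findDuplicate_spec : Claim_equal_findDuplicate := by
  intro nums _
  show findDuplicate nums = findDuplicate_alt nums
  unfold findDuplicate findDuplicate_alt
  rw [findDup_step_eq, PySem.Dict.foldl_insert_getD_add_one_eq_counter,
      findDupGoB_eq]
  show findDupScanA (PySem.Dict.counter nums).items = _
  rw [PySem.Dict.items_counter]
  rw [findDupScanA_map (fun k => ((List.count k nums : Int))) (PySem.Set.ofList nums)]
  rw [find?_ofList]
  have hpred : (fun k : Int => decide ((1 : Int) < ((List.count k nums : Int))))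
      = (fun x : Int => decide (1 < PySem.List.count nums x)) := by
    funext k; simp [PySem.List.count]
  rw [hpred]
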